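-- pv_equiv track=rewrite | github.com/pasures7329/AlgorithmTesting | commonFunctions.py | max_and_matrix
-- ===== SOURCE A (Python) =====
-- def max_and_matrix(matx):
--     higest_number = 0
--     for i in range(len(matx)):
--         for j in range(len(matx[i])):
--             if (matx[i][j] > higest_number):
--                 higest_number = matx[i][j]
--                 rows=i
--                 col=j
--     matx[rows][col] = 0
--     for row in matx:
--         row[col] = 0
--     matx[rows] = [0] * len(matx[rows])
--     return matx,higest_number,rows,col
-- ===== SOURCE B (Python) =====
-- def max_and_matrix(matx):
--     # Different decomposition: value pass (max), location pass (first row containing it,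
--     # index within), then rebuild the matrix functionally instead of mutating in place.
--     # NOTE: returns a NEW matrix (no in-place mutation of the argument).
--     highest_number = max(v for row in matx for v in row)
--     rows = next(i for i, row in enumerate(matx) if highest_number in row)
--     col = matx[rows].index(highest_number)
--     res = [[0] * len(row) if i == rows
--            else [0 if j == col else v for j, v in enumerate(row)]
--            for i, row in enumerate(matx)]
--     return res, highest_number, rows, col
-- ===== Notes on version B (the rewrite author's own statement) =====
-- stated objective: alternative
-- what changed: A finds the argmax in one combined index-tracking scan and then zeroes the matrix by in-place mutation; B separates it into a value pass (max), a location pass (first row containing the max, index within it) and rebuilds the matrix functionally with comprehensions instead of mutating; B returns a new matrix (no in-place mutation of the argument), so the equivalence is about the return value.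
import Mathlib
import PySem

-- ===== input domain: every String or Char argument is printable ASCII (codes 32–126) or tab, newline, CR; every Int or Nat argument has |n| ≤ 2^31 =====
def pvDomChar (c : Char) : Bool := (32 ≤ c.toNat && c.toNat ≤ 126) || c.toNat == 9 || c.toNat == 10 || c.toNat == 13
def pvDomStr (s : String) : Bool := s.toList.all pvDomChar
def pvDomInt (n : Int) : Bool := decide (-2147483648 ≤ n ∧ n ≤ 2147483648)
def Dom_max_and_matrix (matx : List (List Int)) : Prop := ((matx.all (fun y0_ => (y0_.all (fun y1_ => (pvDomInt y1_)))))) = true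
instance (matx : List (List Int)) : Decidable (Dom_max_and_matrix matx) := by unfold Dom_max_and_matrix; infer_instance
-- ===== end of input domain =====

-- B replaces A's single index-tracking argmax scan + in-place mutation by a max pass, a
-- location pass and a functional rebuild (alternative decomposition; equivalence is about the
-- return value only — A mutates its argument in place, B builds a new matrix).


-- ===== PORT A =====
-- Literal port of A: nested index loops tracking (higest_number, rows, col); the position is
-- `none` while rows/col are still unassigned (Python would raise NameError there — excluded by
-- Pre_). `row[col] = 0` is ported with pySetD, exact when col is in range (Pre_ guarantees it;
-- Python raises IndexError otherwise).
def max_and_matrix (matx : List (List Int)) : List (List Int) × Int × Int × Int :=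
  let st := (PySem.List.pyRange 0 (PySem.List.len matx) 1).foldl
    (fun st i =>
      (PySem.List.pyRange 0 (PySem.List.len (PySem.List.pyGetD matx i [])) 1).foldl
        (fun st j =>
          if st.1 < PySem.List.pyGetD (PySem.List.pyGetD matx i []) j 0 then
            (PySem.List.pyGetD (PySem.List.pyGetD matx i []) j 0, some (i, j))
          else st) st)
    ((0 : Int), (none : Option (Int × Int)))
  match st.2 with
  | none => ([], 0, 0, 0)  -- Python: NameError (rows/col never assigned); excluded by Pre_
  | some (r, c) =>
    let m1 := PySem.List.pySetD matx r (PySem.List.pySetD (PySem.List.pyGetD matx r []) c 0)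
    let m2 := m1.map (fun row => PySem.List.pySetD row c 0)
    let m3 := PySem.List.pySetD m2 r
      (PySem.List.pyRepeat [(0 : Int)] (PySem.List.len (PySem.List.pyGetD m2 r [])))
    (m3, st.1, r, c)

-- ===== PORT B =====
-- Port of Source B: max of the flattened matrix, first row containing it, index within that row,
-- then a functional rebuild. The `none` fallbacks are where Source B raises (empty matrix:
-- ValueError from max) or are unreachable (the max is an element of some row); excluded by Pre_.
def max_and_matrix_alt (matx : List (List Int)) : List (List Int) × Int × Int × Int :=
  match PySem.List.max? (matx.flatMap (fun row => row)) (fun v => v) with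
  | none => ([], 0, 0, 0)  -- Python: ValueError from max() on an empty sequence; excluded by Pre_
  | some m =>
    match List.findIdx? (fun row => row.contains m) matx with
    | none => ([], 0, 0, 0)  -- unreachable: m is an element of some row
    | some r =>
      match PySem.List.index? (matx.getD r []) m with
      | none => ([], 0, 0, 0)  -- unreachable: m ∈ matx[r]
      | some c =>
        ((PySem.List.enumerate matx).map (fun p =>
            if p.1 = (r : Int) then List.replicate p.2.length (0 : Int)
            else (PySem.List.enumerate p.2).map (fun q => if q.1 = (c : Int) then 0 else q.2)),
         m, (r : Int), (c : Int))

-- ===== PRECONDITION & SPEC =====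
-- Pre_ is exactly where the Python A returns normally: some element is positive (otherwise
-- rows/col are never assigned and A raises NameError), and the column of the first occurrence
-- of the maximum is a valid index into every row (otherwise `row[col] = 0` raises IndexError).
def Pre_max_and_matrix (matx : List (List Int)) : Prop :=
  0 < (matx.flatMap (fun row => row)).foldl max 0 ∧
  ∀ row ∈ matx,
    ((matx.getD ((List.findIdx? (fun row =>
        row.contains ((matx.flatMap (fun row => row)).foldl max 0)) matx).getD 0) []).idxOf?
      ((matx.flatMap (fun row => row)).foldl max 0)).getD 0 < row.length
instance (matx : List (List Int)) : Decidable (Pre_max_and_matrix matx) := by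
  unfold Pre_max_and_matrix; infer_instance
def pvWitness_max_and_matrix : List (List Int) := [[1, 2], [3, 4]]
def Spec_max_and_matrix (matx : List (List Int)) (out : List (List Int) × Int × Int × Int) : Prop := out = max_and_matrix_alt matx
instance (matx : List (List Int)) (out : List (List Int) × Int × Int × Int) : Decidable (Spec_max_and_matrix matx out) := by unfold Spec_max_and_matrix; infer_instance

-- ===== CLAIM (what is proved, stated in full; the proofs are below) =====
def Claim_equal_max_and_matrix : Prop := ∀ (matx : List (List Int)), Dom_max_and_matrix matx → Pre_max_and_matrix matx → Spec_max_and_matrix matx (max_and_matrix matx)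

-- ===== LEMMAS AND PROOFS =====

-- The update step of A's scan, on one (position, value) cell.
def pvStep (st : Int × Option (Int × Int)) (q : (Int × Int) × Int) : Int × Option (Int × Int) :=
  if st.1 < q.2 then (q.2, some q.1) else st

-- All cells of the matrix as ((i, j), value), row-major, outer index starting at s.
def pvCells (s : Int) (matx : List (List Int)) : List ((Int × Int) × Int) :=
  (PySem.List.enumerate matx s).flatMap
    (fun p => (PySem.List.enumerate p.2).map (fun q => ((p.1, q.1), q.2)))

lemma pvCells_cons (s : Int) (row : List Int) (rest : List (List Int)) :
    pvCells s (row :: rest)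
      = (PySem.List.enumerate row).map (fun q => ((s, q.1), q.2)) ++ pvCells (s + 1) rest := by
  simp [pvCells, PySem.List.enumerate_cons]

-- A's nested index loops are a single pvStep-fold over the cells.
lemma pvFold_eq_cells (matx : List (List Int)) (st0 : Int × Option (Int × Int)) :
    (PySem.List.pyRange 0 (PySem.List.len matx) 1).foldl
      (fun st i =>
        (PySem.List.pyRange 0 (PySem.List.len (PySem.List.pyGetD matx i [])) 1).foldl
          (fun st j =>
            if st.1 < PySem.List.pyGetD (PySem.List.pyGetD matx i []) j 0 then
              (PySem.List.pyGetD (PySem.List.pyGetD matx i []) j 0, some (i, j))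
            else st) st) st0
      = (pvCells 0 matx).foldl pvStep st0 := by
  rw [pvCells, List.foldl_flatMap]
  rw [PySem.List.enumerate_eq_map_pyRange matx [], List.foldl_map]
  apply PySem.List.foldl_congr_mem
  intro st i _
  rw [PySem.List.enumerate_eq_map_pyRange (PySem.List.pyGetD matx i []) 0,
      List.foldl_map, List.foldl_map]
  apply PySem.List.foldl_congr_mem
  intro st' j _
  simp [pvStep]

-- The running maximum of the scan.
lemma pvFold_fst (L : List ((Int × Int) × Int)) (h : Int) (o : Option (Int × Int)) :
    (L.foldl pvStep (h, o)).1 = L.foldl (fun a q => max a q.2) h := by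
  induction L generalizing h o with
  | nil => rfl
  | cons q L ih =>
    simp only [List.foldl_cons]
    by_cases hlt : h < q.2
    · simp only [pvStep, if_pos hlt]
      rw [ih]
      congr 1
      omega
    · simp only [pvStep, if_neg hlt]
      rw [ih]
      congr 1
      omega

-- Position component of the scan: the first cell holding the running maximum, provided the
-- maximum beat the seed; otherwise untouched.
lemma pvFold_snd (L : List ((Int × Int) × Int)) (h : Int) (o : Option (Int × Int)) :
    (h < L.foldl (fun a q => max a q.2) h →
      (L.foldl pvStep (h, o)).2
        = (L.find? (fun q => q.2 == L.foldl (fun a q => max a q.2) h)).map Prod.fst)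
    ∧ (¬ h < L.foldl (fun a q => max a q.2) h → (L.foldl pvStep (h, o)).2 = o) := by
  induction L generalizing h o with
  | nil => simp
  | cons q L ih =>
    simp only [List.foldl_cons]
    by_cases hlt : h < q.2
    · have hstep : pvStep (h, o) q = (q.2, some q.1) := by simp [pvStep, hlt]
      rw [hstep]
      have hmax : max h q.2 = q.2 := by omega
      rw [hmax]
      have hqH : q.2 ≤ L.foldl (fun a q => max a q.2) q.2 :=
        (PySem.List.le_foldl_max_int L (fun q => q.2) q.2).1
      obtain ⟨ih1, ih2⟩ := ih q.2 (some q.1)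
      by_cases hQ : q.2 < L.foldl (fun a q => max a q.2) q.2
      · refine ⟨fun _ => ?_, fun hcon => absurd (hlt.trans hQ) hcon⟩
        rw [ih1 hQ, List.find?_cons]
        have hne : (q.2 == L.foldl (fun a q => max a q.2) q.2) = false := by
          simp only [beq_eq_false_iff_ne, ne_eq]
          omega
        simp [hne]
      · have hEq : L.foldl (fun a q => max a q.2) q.2 = q.2 := by omega
        refine ⟨fun _ => ?_, fun hcon => absurd (by omega : h < L.foldl (fun a q => max a q.2) q.2) hcon⟩
        rw [ih2 hQ, List.find?_cons]
        have heq : (q.2 == L.foldl (fun a q => max a q.2) q.2) = true := by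
          simp [hEq]
        simp [heq]
    · have hstep : pvStep (h, o) q = (h, o) := by simp [pvStep, hlt]
      rw [hstep]
      have hmax : max h q.2 = h := by omega
      rw [hmax]
      obtain ⟨ih1, ih2⟩ := ih h o
      refine ⟨fun hH => ?_, fun hH => ih2 hH⟩
      rw [ih1 hH, List.find?_cons]
      have hne : (q.2 == L.foldl (fun a q => max a q.2) h) = false := by
        simp only [beq_eq_false_iff_ne, ne_eq]
        omega
      simp [hne]

-- The values of the cells are the flattened matrix.
lemma pvCells_vals (matx : List (List Int)) (s : Int) :
    (pvCells s matx).map (fun q => q.2) = matx.flatMap (fun row => row) := by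
  induction matx generalizing s with
  | nil => simp [pvCells]
  | cons row rest ih =>
    rw [pvCells_cons]
    simp only [List.map_append, List.map_map, ih]
    congr 1
    have hcomp : ((fun (q : (Int × Int) × Int) => q.2) ∘ fun (q : Int × Int) => ((s, q.1), q.2))
        = fun (q : Int × Int) => q.2 := rfl
    rw [hcomp]
    exact PySem.List.map_snd_enumerate row 0

-- Locating the first cell with value m inside one row.
lemma pvFind_row (row : List Int) (m : Int) (i t : Int) (c : Nat)
    (hc : PySem.List.index? row m = some c) :
    ((PySem.List.enumerate row t).map (fun q => ((i, q.1), q.2))).find?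
        (fun q => q.2 == m) = some ((i, t + (c : Int)), m) := by
  induction row generalizing t c with
  | nil =>
    rw [PySem.List.index?_eq_idxOf?] at hc
    simp at hc
  | cons x row ih =>
    by_cases hx : x = m
    · subst hx
      rw [PySem.List.index?_cons_self] at hc
      obtain rfl : (0 : Nat) = c := by simpa using hc
      rw [PySem.List.enumerate_cons]
      simp only [List.map_cons, List.find?_cons, beq_self_eq_true]
      simp
    · rw [PySem.List.index?_cons_of_ne _ hx] at hc
      obtain ⟨c', hc', rfl⟩ := Option.map_eq_some_iff.mp hc
      have hrec := ih (t + 1) c' hc'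
      rw [PySem.List.enumerate_cons]
      simp only [List.map_cons, List.find?_cons]
      have hne : (x == m) = false := by simp [hx]
      simp only [hne]
      rw [hrec]
      have hcast : t + 1 + (c' : Int) = t + ((c' + 1 : Nat) : Int) := by push_cast; ring
      rw [hcast]

-- Locating the first cell with value m across the rows.
lemma pvFind_cells (matx : List (List Int)) (m : Int) (s : Int) (r c : Nat)
    (hr : List.findIdx? (fun row => row.contains m) matx = some r)
    (hc : PySem.List.index? (matx.getD r []) m = some c) :
    (pvCells s matx).find? (fun q => q.2 == m) = some ((s + (r : Int), (c : Int)), m) := by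
  induction matx generalizing s r with
  | nil => simp at hr
  | cons row rest ih =>
    rw [List.findIdx?_cons] at hr
    by_cases hrow : row.contains m
    · rw [if_pos hrow] at hr
      obtain rfl : (0 : Nat) = r := by simpa using hr
      simp only [List.getD_cons_zero] at hc
      rw [pvCells_cons, List.find?_append, pvFind_row row m s 0 c hc]
      simp
    · rw [if_neg (by simpa using hrow)] at hr
      obtain ⟨r', hr', rfl⟩ := Option.map_eq_some_iff.mp hr
      have hnone : ((PySem.List.enumerate row).map (fun q => ((s, q.1), q.2))).find?
          (fun q => q.2 == m) = none := by
        rw [List.find?_eq_none]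
        intro q hq
        obtain ⟨a, ha, rfl⟩ := List.mem_map.mp hq
        have hmem : a.2 ∈ row := by
          rw [← PySem.List.map_snd_enumerate row 0]
          exact List.mem_map_of_mem ha
        have : m ∉ row := by simpa using hrow
        simp only [beq_iff_eq]
        intro heq
        exact this (heq ▸ hmem)
      rw [pvCells_cons, List.find?_append, hnone, Option.none_or]
      simp only [List.getD_cons_succ] at hc
      have hcast : s + 1 + (r' : Int) = s + ((r' + 1 : Nat) : Int) := by push_cast; ring
      rw [ih (s + 1) r' hr' hc, hcast]

-- pySetD at an in-range nonnegative index is List.set.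
lemma pvSetD_natCast {α : Type} (xs : List α) (n : Nat) (v : α) (h : n < xs.length) :
    PySem.List.pySetD xs (n : Int) v = xs.set n v := by
  simp [PySem.List.pySetD, PySem.List.pySet?, PySem.List.pyIdx?, h]

-- Zeroing column c of a row is B's enumerate-comprehension (c in range).
lemma pvCol_zero (row : List Int) (c : Nat) (_h : c < row.length) :
    row.set c 0
      = (PySem.List.enumerate row).map (fun q => if q.1 = (c : Int) then 0 else q.2) := by
  apply List.ext_getElem
  · simp [PySem.List.length_enumerate]
  · intro k h1 h2
    simp only [List.getElem_set, List.getElem_map, PySem.List.getElem_enumerate]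
    by_cases hck : c = k
    · subst hck
      simp
    · rw [if_neg hck, if_neg (by omega : ¬ ((0 : Int) + (k : Int) = (c : Int)))]

-- ===== VERDICT (by name: the statement is the Claim_ definition above) =====
theorem max_and_matrix_spec : Claim_equal_max_and_matrix := by
  intro matx _ hpre
  unfold Spec_max_and_matrix
  obtain ⟨hpos, hcols⟩ := hpre
  -- the maximum is attained and positive
  have hmemH : (matx.flatMap (fun row => row)).foldl max 0 ∈ matx.flatMap (fun row => row) := by
    rcases PySem.List.foldl_max_mem (matx.flatMap (fun row => row)) 0 with h0 | h
    · exact absurd (h0 ▸ hpos) (lt_irrefl 0)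
    · exact h
  have hnil : matx.flatMap (fun row => row) ≠ [] := List.ne_nil_of_mem hmemH
  obtain ⟨m, hm⟩ : ∃ m, PySem.List.max? (matx.flatMap (fun row => row)) (fun v => v) = some m := by
    cases hmx : PySem.List.max? (matx.flatMap (fun row => row)) (fun v => v) with
    | none => exact absurd ((PySem.List.max?_eq_none_iff _ _).mp hmx) hnil
    | some m => exact ⟨m, rfl⟩
  have hmH : m = (matx.flatMap (fun row => row)).foldl max 0 := by
    have h1 := PySem.List.max?_mem hm
    have h2 := PySem.List.max?_isMax hm _ hmemH
    have h3 := (PySem.List.le_foldl_max (matx.flatMap (fun row => row)) 0).2 m h1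
    omega
  rw [← hmH] at hpos hcols
  -- the first row containing m, and m's index in it
  obtain ⟨rowm, hrowmem, hmrowm⟩ := List.mem_flatMap.mp (hmH ▸ hmemH)
  obtain ⟨r, hr⟩ : ∃ r, List.findIdx? (fun row => row.contains m) matx = some r := by
    cases hfi : List.findIdx? (fun row => row.contains m) matx with
    | none =>
      have := List.findIdx?_eq_none_iff.mp hfi rowm hrowmem
      simp [hmrowm] at this
    | some r => exact ⟨r, rfl⟩
  obtain ⟨hrlen, hrP, _⟩ := List.findIdx?_eq_some_iff_getElem.mp hr
  have hmrow : m ∈ matx[r] := by simpa using hrP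
  have hgetD : matx.getD r [] = matx[r] := List.getD_eq_getElem _ _ hrlen
  obtain ⟨c, hc⟩ : ∃ c, PySem.List.index? (matx.getD r []) m = some c := by
    cases hix : PySem.List.index? (matx.getD r []) m with
    | none =>
      rw [PySem.List.index?_eq_idxOf?, hgetD] at hix
      rw [List.idxOf?_eq_none_iff] at hix
      exact absurd hmrow hix
    | some c => exact ⟨c, rfl⟩
  have hc' : PySem.List.index? matx[r] m = some c := hgetD ▸ hc
  obtain ⟨hclen, hcval, _⟩ := PySem.List.getElem_of_index?_eq_some hc'
  -- the Pre_ column bound, in terms of c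
  rw [hr] at hcols
  simp only [Option.getD_some] at hcols
  rw [← PySem.List.index?_eq_idxOf?, hc] at hcols
  simp only [Option.getD_some] at hcols
  -- the scan result
  have hHm : (pvCells 0 matx).foldl (fun a q => max a q.2) 0 = m := by
    rw [← List.foldl_map (f := fun q => ((q : (Int × Int) × Int)).2) (g := max), pvCells_vals, ← hmH]
  have hfst : ((pvCells 0 matx).foldl pvStep ((0 : Int), (none : Option (Int × Int)))).1 = m := by
    rw [pvFold_fst, hHm]
  have hsnd : ((pvCells 0 matx).foldl pvStep ((0 : Int), (none : Option (Int × Int)))).2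
      = some (((r : Nat) : Int), ((c : Nat) : Int)) := by
    have h1 := (pvFold_snd (pvCells 0 matx) 0 none).1
    rw [hHm] at h1
    rw [h1 hpos, pvFind_cells matx m 0 r c hr hc]
    simp
  -- reduce both ports
  unfold max_and_matrix max_and_matrix_alt
  rw [pvFold_eq_cells]
  simp only [hsnd, hfst, hm, hr, hc]
  -- the matrix rebuild
  simp only [Prod.mk.injEq]
  refine ⟨?_, trivial⟩
  have hm1 : PySem.List.pySetD matx ((r : Nat) : Int)
      (PySem.List.pySetD (PySem.List.pyGetD matx ((r : Nat) : Int) []) ((c : Nat) : Int) 0)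
      = matx.set r (matx[r].set c 0) := by
    rw [PySem.List.pyGetD_natCast, hgetD, pvSetD_natCast _ _ _ hclen, pvSetD_natCast _ _ _ hrlen]
  rw [hm1]
  have hm2 : (matx.set r (matx[r].set c 0)).map (fun row => PySem.List.pySetD row ((c : Nat) : Int) 0)
      = (matx.set r (matx[r].set c 0)).map (fun row => row.set c 0) := by
    apply List.map_congr_left
    intro row hrow
    rcases List.mem_or_eq_of_mem_set hrow with hmem | rfl
    · exact pvSetD_natCast _ _ _ (hcols row hmem)
    · exact pvSetD_natCast _ _ _ (by simpa using hclen)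
  rw [hm2]
  have hrlen2 : r < ((matx.set r (matx[r].set c 0)).map (fun row => row.set c 0)).length := by
    simpa using hrlen
  have hrep : PySem.List.pyGetD ((matx.set r (matx[r].set c 0)).map (fun row => row.set c 0)) ((r : Nat) : Int) []
      = (matx[r].set c 0).set c 0 := by
    rw [PySem.List.pyGetD_natCast, List.getD_eq_getElem _ _ hrlen2, List.getElem_map,
        List.getElem_set, if_pos rfl]
  rw [hrep, pvSetD_natCast _ _ _ hrlen2, PySem.List.pyRepeat_singleton]
  -- elementwise comparison with B's rebuild
  apply List.ext_getElem
  · simp [PySem.List.length_enumerate]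
  · intro k h1 h2
    simp only [List.getElem_set, List.getElem_map, PySem.List.getElem_enumerate]
    by_cases hkr : k = r
    · subst hkr
      simp [PySem.List.len]
    · simp only [if_neg (fun h : r = k => hkr h.symm),
        if_neg (by omega : ¬ ((0 : Int) + (k : Int) = ((r : Nat) : Int)))]
      have hk : k < matx.length := by simpa using h1
      exact pvCol_zero (matx[k]'hk) c (hcols _ (List.getElem_mem _))
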